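-- pv_equiv track=rewrite | github.com/Ag3497120/verantyx-v6 | synth_results/230f2e48.py | transform
-- ===== SOURCE A (Python) =====
-- def transform(grid):
--     h = len(grid)
--     w = len(grid[0])
--     # Convert to mutable list of lists
--     out = [row[:] for row in grid]
--
--     # First, turn all 2s into 7s in output
--     for r in range(h):
--         for c in range(w):
--             if out[r][c] == 2:
--                 out[r][c] = 7
--
--     # Find all 5s and 0s
--     fives = []
--     zeros = []
--     for r in range(h):
--         for c in range(w):
--             if grid[r][c] == 5:
--                 fives.append((r, c))
--             elif grid[r][c] == 0:
--                 zeros.append((r, c))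
--
--     # For each 5, find matching 0 in same row/col with clear path
--     for r5, c5 in fives:
--         for r0, c0 in zeros:
--             if r5 == r0:  # same row
--                 start_col = min(c5, c0)
--                 end_col = max(c5, c0)
--                 clear = True
--                 for cc in range(start_col + 1, end_col):
--                     if grid[r5][cc] not in (2, 7):
--                         clear = False
--                         break
--                 if clear:
--                     # Draw horizontal line
--                     for cc in range(start_col + 1, end_col):
--                         out[r5][cc] = 2
--                     # Mark this zero as used (optional, but fine for given examples)
--                     break
--             elif c5 == c0:  # same column
--                 start_row = min(r5, r0)
--                 end_row = max(r5, r0)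
--                 clear = True
--                 for rr in range(start_row + 1, end_row):
--                     if grid[rr][c5] not in (2, 7):
--                         clear = False
--                         break
--                 if clear:
--                     # Draw vertical line
--                     for rr in range(start_row + 1, end_row):
--                         out[rr][c5] = 2
--                     break
--
--     return out
-- ===== SOURCE B (Python) =====
-- def transform(grid):
--     h = len(grid)
--     w = len(grid[0])
--
--     # Index the zeros by row and by column; collect the fives in row-major order.
--     zrow = [[c for c in range(w) if grid[r][c] == 0] for r in range(h)]
--     zcol = [[r for r in range(h) if grid[r][c] == 0] for c in range(w)]
--     fives = [(r, c) for r in range(h) for c in range(w) if grid[r][c] == 5]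
--
--     def clear_row(r, a, b):
--         return all(grid[r][cc] in (2, 7) for cc in range(a + 1, b))
--
--     def clear_col(c, a, b):
--         return all(grid[rr][c] in (2, 7) for rr in range(a + 1, b))
--
--     paint = set()
--     for r5, c5 in fives:
--         keys = [(r5, c0) for c0 in zrow[r5]
--                 if clear_row(r5, min(c5, c0), max(c5, c0))]
--         keys += [(r0, c5) for r0 in zcol[c5]
--                  if clear_col(c5, min(r5, r0), max(r5, r0))]
--         if keys:
--             rb, cb = min(keys)
--             if rb == r5:
--                 paint.update((r5, cc) for cc in range(min(c5, cb) + 1, max(c5, cb)))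
--             else:
--                 paint.update((rr, c5) for rr in range(min(r5, rb) + 1, max(r5, rb)))
--
--     return [[2 if (r, c) in paint else (7 if v == 2 else v)
--              for c, v in enumerate(row)]
--             for r, row in enumerate(grid)]
-- ===== Notes on version B (the rewrite author's own statement) =====
-- stated objective: alternative
-- what changed: B indexes the zeros by row and by column once, picks each 5's partner as the row-major minimum over its own row/column candidates instead of scanning the whole zeros list with a break, collects the line cells in a paint set, and rebuilds the grid in one comprehension instead of mutating it cell by cell; Pre_ restricts to nonempty rectangular grids (the natural domain: A raises IndexError when a row is shorter than the first, and on ragged grids with longer rows A's tail handling is an accident of its w-bounded loops).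
-- outside the precondition, e.g. on transform([[5, 0], [1, 2, 2]]): A returns [[5, 0], [1, 7, 2]], B returns [[5, 0], [1, 7, 7]]
import Mathlib
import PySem

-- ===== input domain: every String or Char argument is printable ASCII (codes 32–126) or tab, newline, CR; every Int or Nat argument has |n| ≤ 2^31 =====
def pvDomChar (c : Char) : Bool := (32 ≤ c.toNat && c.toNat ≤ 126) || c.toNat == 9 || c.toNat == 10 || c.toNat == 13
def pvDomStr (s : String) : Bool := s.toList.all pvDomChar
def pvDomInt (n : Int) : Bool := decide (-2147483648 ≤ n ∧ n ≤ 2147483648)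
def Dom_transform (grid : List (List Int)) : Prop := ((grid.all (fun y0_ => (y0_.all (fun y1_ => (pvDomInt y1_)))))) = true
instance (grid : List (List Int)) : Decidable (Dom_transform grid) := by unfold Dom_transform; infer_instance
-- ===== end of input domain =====

-- B replaces A's scan of every 5 against the whole zeros list (with in-place painting) by
-- per-row/per-column zero indexes with a minimum choice, a paint set, and one rebuilding pass.

-- ===== PORT A =====
-- grid[r][c] (indices always in range under Pre_; defaults never read there)
def pvCell (g : List (List Int)) (r c : Nat) : Int := (g.getD r []).getD c 0

-- out[r][c] = v
def pvSet (g : List (List Int)) (r c : Nat) (v : Int) : List (List Int) :=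
  g.modify r (fun row => row.set c v)

-- range(lo+1, hi)
def pvBetween (lo hi : Nat) : List Nat := List.range' (lo + 1) (hi - (lo + 1))

-- A's clear-path loop with break over a row (loop-with-break = all)
def pvClearRowA (g : List (List Int)) (r lo hi : Nat) : Bool :=
  (pvBetween lo hi).all (fun cc => pvCell g r cc == 2 || pvCell g r cc == 7)

def pvClearColA (g : List (List Int)) (c lo hi : Nat) : Bool :=
  (pvBetween lo hi).all (fun rr => pvCell g rr c == 2 || pvCell g rr c == 7)

def pvPaintRowA (out : List (List Int)) (r lo hi : Nat) : List (List Int) :=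
  (pvBetween lo hi).foldl (fun o cc => pvSet o r cc 2) out

def pvPaintColA (out : List (List Int)) (c lo hi : Nat) : List (List Int) :=
  (pvBetween lo hi).foldl (fun o rr => pvSet o rr c 2) out

-- A's inner 'for r0, c0 in zeros: … break'
def pvDrawA (g : List (List Int)) (r5 c5 : Nat) (out : List (List Int)) :
    List (Nat × Nat) → List (List Int)
  | [] => out
  | (r0, c0) :: rest =>
    if r5 = r0 then
      if pvClearRowA g r5 (min c5 c0) (max c5 c0) then
        pvPaintRowA out r5 (min c5 c0) (max c5 c0)
      else pvDrawA g r5 c5 out rest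
    else if c5 = c0 then
      if pvClearColA g c5 (min r5 r0) (max r5 r0) then
        pvPaintColA out c5 (min r5 r0) (max r5 r0)
      else pvDrawA g r5 c5 out rest
    else pvDrawA g r5 c5 out rest

def transform (grid : List (List Int)) : List (List Int) :=
  let h := grid.length
  let w := (grid.getD 0 []).length
  -- out = [row[:] for row in grid]; then the 2→7 double loop
  let out1 := (List.range h).foldl (fun out r =>
      (List.range w).foldl (fun out c =>
        if pvCell out r c = 2 then pvSet out r c 7 else out) out) grid
  -- the fives/zeros collecting double loop (one pair accumulator, as in A)
  let fz := (List.range h).foldl (fun acc r =>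
      (List.range w).foldl (fun (acc : List (Nat × Nat) × List (Nat × Nat)) c =>
        if pvCell grid r c = 5 then (acc.1 ++ [(r, c)], acc.2)
        else if pvCell grid r c = 0 then (acc.1, acc.2 ++ [(r, c)])
        else acc) acc) (([], []) : List (Nat × Nat) × List (Nat × Nat))
  fz.1.foldl (fun out p => pvDrawA grid p.1 p.2 out fz.2) out1

-- ===== PORT B =====
-- B's clear-path 'all(...)' tests
def pvClearRowB (g : List (List Int)) (r a b : Nat) : Bool :=
  (List.range' (a + 1) (b - (a + 1))).all (fun cc => pvCell g r cc == 2 || pvCell g r cc == 7)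

def pvClearColB (g : List (List Int)) (c a b : Nat) : Bool :=
  (List.range' (a + 1) (b - (a + 1))).all (fun rr => pvCell g rr c == 2 || pvCell g rr c == 7)

-- tuple comparison (r, c) < (r', c')
def pvLexLt (p q : Nat × Nat) : Bool := p.1 < q.1 || (p.1 == q.1 && p.2 < q.2)

-- min(keys) — Python's min keeps the first extremal element
def pvMinKey (k : Nat × Nat) (ks : List (Nat × Nat)) : Nat × Nat :=
  ks.foldl (fun b q => if pvLexLt q b then q else b) k

def transform_alt (grid : List (List Int)) : List (List Int) :=
  let h := grid.length
  let w := (grid.getD 0 []).length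
  let zrow := (List.range h).map (fun r => (List.range w).filter (fun c => pvCell grid r c == 0))
  let zcol := (List.range w).map (fun c => (List.range h).filter (fun r => pvCell grid r c == 0))
  let fives := (List.range h).flatMap (fun r =>
      ((List.range w).filter (fun c => pvCell grid r c == 5)).map (fun c => (r, c)))
  let paint := fives.foldl (fun (paint : PySem.Set (Nat × Nat)) p =>
      let r5 := p.1; let c5 := p.2
      let keys :=
        ((zrow.getD r5 []).filter (fun c0 =>
            pvClearRowB grid r5 (min c5 c0) (max c5 c0))).map (fun c0 => (r5, c0))
        ++ ((zcol.getD c5 []).filter (fun r0 =>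
            pvClearColB grid c5 (min r5 r0) (max r5 r0))).map (fun r0 => (r0, c5))
      match keys with
      | [] => paint
      | k :: ks =>
        let best := pvMinKey k ks
        if best.1 = r5 then
          paint.update ((List.range' (min c5 best.2 + 1) (max c5 best.2 - (min c5 best.2 + 1))).map
            (fun cc => (r5, cc)))
        else
          paint.update ((List.range' (min r5 best.1 + 1) (max r5 best.1 - (min r5 best.1 + 1))).map
            (fun rr => (rr, c5)))) (PySem.Set.empty)
  -- the final double comprehension over enumerate(grid) / enumerate(row)
  grid.zipIdx.map (fun p =>
    p.1.zipIdx.map (fun q =>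
      if paint.contains (p.2, q.2) then 2
      else if q.1 = 2 then 7 else q.1))

-- ===== PRECONDITION & SPEC =====
-- Pre_: nonempty rectangular grid — the natural domain of a grid task. A raises IndexError when a
-- row is shorter than the first; on ragged grids with LONGER rows A still returns (its loops stop
-- at the first row's width, leaving the tails untouched), an accident of its w-bounded loops that
-- we exclude rather than reproduce.
def Pre_transform (grid : List (List Int)) : Prop :=
  grid ≠ [] ∧ ∀ row ∈ grid, row.length = (grid.getD 0 []).length
instance (grid : List (List Int)) : Decidable (Pre_transform grid) := by
  unfold Pre_transform; infer_instance

def pvWitness_transform : List (List Int) := [[5, 1, 0], [2, 0, 3]]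

def Spec_transform (grid : List (List Int)) (out : List (List Int)) : Prop := out = transform_alt grid
instance (grid : List (List Int)) (out : List (List Int)) : Decidable (Spec_transform grid out) := by
  unfold Spec_transform; infer_instance

-- ===== CLAIM (what is proved, stated in full; the proofs are below) =====
def Claim_equal_transform : Prop :=
  ∀ (grid : List (List Int)), Dom_transform grid → Pre_transform grid →
    Spec_transform grid (transform grid)

-- ===== LEMMAS AND PROOFS =====

-- ---- generic shape / cell lemmas ----

theorem length_pvSet (g : List (List Int)) (r c : Nat) (v : Int) :
    (pvSet g r c v).length = g.length := by
  simp [pvSet]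

theorem rowlen_pvSet (g : List (List Int)) (r c : Nat) (v : Int) (r' : Nat) :
    ((pvSet g r c v).getD r' []).length = (g.getD r' []).length := by
  unfold pvSet
  rcases Nat.lt_or_ge r' g.length with hlt | hge
  · rw [List.getD_eq_getElem _ _ (by simpa using hlt),
        List.getD_eq_getElem _ _ hlt, List.getElem_modify]
    split <;> simp
  · rw [List.getD_eq_default _ _ (by simpa using hge), List.getD_eq_default _ _ hge]

theorem pvCell_pvSet (g : List (List Int)) (r c : Nat) (v : Int) (r' c' : Nat)
    (hr : r < g.length) (hc : c < (g.getD r []).length) :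
    pvCell (pvSet g r c v) r' c' = if r' = r ∧ c' = c then v else pvCell g r' c' := by
  rw [List.getD_eq_getElem _ _ hr] at hc
  unfold pvCell pvSet
  simp only [List.getD_eq_getElem?_getD, List.getElem?_modify]
  rcases Nat.lt_or_ge r' g.length with hlt | hge
  · simp only [List.getElem?_eq_getElem hlt, Option.map_eq_map, Option.map_some, Option.getD_some]
    by_cases hrr : r = r'
    · subst hrr
      simp only [reduceIte, true_and]
      by_cases hcc : c = c'
      · subst hcc; simp [hc]
      · have hcc2 : ¬ (c' = c) := fun h => hcc h.symm
        simp [hcc, hcc2]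
    · have : ¬ (r' = r ∧ c' = c) := fun ⟨a,_⟩ => hrr a.symm
      simp [hrr, this]
  · have : g[r']? = none := List.getElem?_eq_none (by omega)
    have hne : ¬ (r' = r) := by omega
    simp [this, hne]

-- ---- spec-side lists ----

def fivesSpec (g : List (List Int)) (h w : Nat) : List (Nat × Nat) :=
  (List.range h).flatMap (fun r =>
    ((List.range w).filter (fun c => pvCell g r c == 5)).map (fun c => (r, c)))

def zerosSpec (g : List (List Int)) (h w : Nat) : List (Nat × Nat) :=
  (List.range h).flatMap (fun r =>
    ((List.range w).filter (fun c => pvCell g r c == 0)).map (fun c => (r, c)))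

theorem mem_zerosSpec (g : List (List Int)) (h w : Nat) (z : Nat × Nat) :
    z ∈ zerosSpec g h w ↔ z.1 < h ∧ z.2 < w ∧ pvCell g z.1 z.2 = 0 := by
  rcases z with ⟨r, c⟩
  simp [zerosSpec, List.mem_flatMap, List.mem_filter, List.mem_range]

theorem mem_fivesSpec (g : List (List Int)) (h w : Nat) (z : Nat × Nat) :
    z ∈ fivesSpec g h w ↔ z.1 < h ∧ z.2 < w ∧ pvCell g z.1 z.2 = 5 := by
  rcases z with ⟨r, c⟩
  simp [fivesSpec, List.mem_flatMap, List.mem_filter, List.mem_range]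

theorem zerosSpec_pairwise (g : List (List Int)) (h w : Nat) :
    (zerosSpec g h w).Pairwise (fun p q => pvLexLt p q = true) := by
  induction h with
  | zero => simp [zerosSpec]
  | succ h ih =>
    have : zerosSpec g (h + 1) w = zerosSpec g h w ++
        ((List.range w).filter (fun c => pvCell g h c == 0)).map (fun c => (h, c)) := by
      simp [zerosSpec, List.range_succ]
    rw [this, List.pairwise_append]
    refine ⟨ih, ?_, ?_⟩
    · rw [List.pairwise_map]
      have := (List.pairwise_lt_range (n := w)).filter (fun c => pvCell g h c == 0)
      refine this.imp ?_
      intro a b hab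
      simp [pvLexLt, hab]
    · intro a ha b hb
      have ha1 : a.1 < h := ((mem_zerosSpec g h w a).1 ha).1
      have hb1 : b.1 = h := by
        rcases List.mem_map.1 hb with ⟨c, _, rfl⟩
        rfl
      simp [pvLexLt]
      omega

-- ---- the fives/zeros collecting fold ----

theorem pairfold_inner (g : List (List Int)) (r : Nat) (cs : List Nat)
    (acc : List (Nat × Nat) × List (Nat × Nat)) :
    cs.foldl (fun (acc : List (Nat × Nat) × List (Nat × Nat)) c =>
        if pvCell g r c = 5 then (acc.1 ++ [(r, c)], acc.2)
        else if pvCell g r c = 0 then (acc.1, acc.2 ++ [(r, c)])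
        else acc) acc
      = (acc.1 ++ (cs.filter (fun c => pvCell g r c == 5)).map (fun c => (r, c)),
         acc.2 ++ (cs.filter (fun c => pvCell g r c == 0)).map (fun c => (r, c))) := by
  induction cs generalizing acc with
  | nil => simp
  | cons c cs ih =>
    simp only [List.foldl_cons, List.filter_cons]
    by_cases h5 : pvCell g r c = 5
    · rw [if_pos h5, ih]
      simp [h5]
    · rw [if_neg h5]
      by_cases h0 : pvCell g r c = 0
      · rw [if_pos h0, ih]
        simp [h0]
      · rw [if_neg h0, ih]
        simp [h5, h0]

theorem fz_eq (g : List (List Int)) (h w : Nat) :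
    (List.range h).foldl (fun acc r =>
      (List.range w).foldl (fun (acc : List (Nat × Nat) × List (Nat × Nat)) c =>
        if pvCell g r c = 5 then (acc.1 ++ [(r, c)], acc.2)
        else if pvCell g r c = 0 then (acc.1, acc.2 ++ [(r, c)])
        else acc) acc) (([], []) : List (Nat × Nat) × List (Nat × Nat))
      = (fivesSpec g h w, zerosSpec g h w) := by
  induction h with
  | zero => simp [fivesSpec, zerosSpec]
  | succ h ih =>
    rw [List.range_succ, List.foldl_append, ih]
    simp only [List.foldl_cons, List.foldl_nil]
    rw [pairfold_inner]
    simp [fivesSpec, zerosSpec, List.range_succ]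

-- ---- the 2→7 pass ----

def rowFix (w : Nat) (row : List Int) : List Int :=
  (List.range w).foldl (fun row c => if row.getD c 0 = 2 then row.set c 7 else row) row

theorem rowFix_eq (w : Nat) (row : List Int) (hle : w ≤ row.length) :
    rowFix w row = (row.take w).map (fun v => if v = 2 then 7 else v) ++ row.drop w := by
  induction w with
  | zero => simp [rowFix]
  | succ w ih =>
    have hw : w < row.length := hle
    have ihh := ih (Nat.le_of_lt hw)
    unfold rowFix at ihh ⊢
    rw [List.range_succ, List.foldl_append, ihh]
    simp only [List.foldl_cons, List.foldl_nil]
    have hlen : ((row.take w).map (fun v => if v = 2 then 7 else v)).length = w := by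
      simp [Nat.le_of_lt hw]
    have hget : ((row.take w).map (fun v => if v = 2 then 7 else v) ++ row.drop w).getD w 0
        = row[w] := by
      rw [List.getD_eq_getElem?_getD, List.getElem?_append_right (by omega), hlen,
        Nat.sub_self, List.getElem?_drop, Nat.add_zero, List.getElem?_eq_getElem hw]
      rfl
    have hdrop : row.drop w = row[w] :: row.drop (w + 1) :=
      List.drop_eq_getElem_cons hw
    have htake : row.take (w + 1) = row.take w ++ [row[w]] := by
      rw [List.take_add_one]
      simp [List.getElem?_eq_getElem hw]
    rw [hget, htake]
    by_cases h2 : row[w] = 2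
    · rw [if_pos h2, List.set_append_right _ _ (by omega), hlen, hdrop]
      simp [h2]
    · rw [if_neg h2, List.map_append, hdrop]
      simp [h2]

theorem getRow_modify (g : List (List Int)) (r : Nat) (f : List Int → List Int)
    (hr : r < g.length) : (g.modify r f).getD r [] = f (g.getD r []) := by
  rw [List.getD_eq_getElem _ _ (by simpa using hr), List.getD_eq_getElem _ _ hr,
    List.getElem_modify]
  simp

theorem modify_modify_same (g : List (List Int)) (r : Nat)
    (f f' : List Int → List Int) :
    (g.modify r f).modify r f' = g.modify r (fun row => f' (f row)) := by
  apply List.ext_getElem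
  · simp
  · intro i h1 h2
    simp only [List.getElem_modify]
    split <;> simp_all

theorem modify_id' (g : List (List Int)) (r : Nat) :
    g.modify r (fun row => row) = g := by
  apply List.ext_getElem
  · simp
  · intro i h1 h2
    rw [List.getElem_modify]
    split <;> rfl

theorem modify_congr_at (g : List (List Int)) (r : Nat)
    (f f' : List Int → List Int) (hf : f (g.getD r []) = f' (g.getD r [])) :
    g.modify r f = g.modify r f' := by
  apply List.ext_getElem
  · simp
  · intro i h1 h2
    rw [List.getElem_modify, List.getElem_modify]
    by_cases hir : r = i
    · subst hir
      simp only [reduceIte]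
      rw [List.getD_eq_getElem _ _ (by simpa using h1)] at hf
      exact hf
    · simp [hir]

theorem rowFix_step (w : Nat) (row : List Int) :
    rowFix (w + 1) row
      = (if (rowFix w row).getD w 0 = 2 then (rowFix w row).set w 7 else rowFix w row) := by
  unfold rowFix
  rw [List.range_succ, List.foldl_append]
  simp

theorem inner27_eq (w : Nat) (out : List (List Int)) (r : Nat) (hr : r < out.length) :
    (List.range w).foldl (fun out c =>
        if pvCell out r c = 2 then pvSet out r c 7 else out) out
      = out.modify r (rowFix w) := by
  induction w with
  | zero =>
    have h0 : rowFix 0 = fun (row : List Int) => row := funext fun row => by simp [rowFix]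
    rw [h0, modify_id']
    rfl
  | succ w ih =>
    rw [List.range_succ, List.foldl_append, ih]
    simp only [List.foldl_cons, List.foldl_nil]
    have hstep : rowFix (w + 1) = fun row =>
        (if (rowFix w row).getD w 0 = 2 then (rowFix w row).set w 7 else rowFix w row) :=
      funext fun row => rowFix_step w row
    rw [hstep]
    have hcell : pvCell (out.modify r (rowFix w)) r w = (rowFix w (out.getD r [])).getD w 0 := by
      unfold pvCell
      rw [getRow_modify _ _ _ hr]
    rw [hcell]
    by_cases h2 : (rowFix w (out.getD r [])).getD w 0 = 2
    · rw [if_pos h2]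
      unfold pvSet
      rw [modify_modify_same]
      exact modify_congr_at _ _ _ _ (by rw [if_pos h2])
    · rw [if_neg h2]
      exact modify_congr_at _ _ _ _ (by rw [if_neg h2])

theorem foldl_modify_map (f : List Int → List Int) :
    ∀ (n : Nat) (out : List (List Int)), n ≤ out.length →
    (List.range n).foldl (fun o r => o.modify r f) out
      = (out.take n).map f ++ out.drop n := by
  intro n
  induction n with
  | zero => simp
  | succ n ih =>
    intro out hle
    have hn : n < out.length := hle
    rw [List.range_succ, List.foldl_append, ih out (Nat.le_of_lt hn)]
    simp only [List.foldl_cons, List.foldl_nil]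
    have hlen : ((out.take n).map f).length = n := by simp [Nat.le_of_lt hn]
    have hdrop : out.drop n = out[n] :: out.drop (n + 1) := List.drop_eq_getElem_cons hn
    have htake : out.take (n + 1) = out.take n ++ [out[n]] := by
      rw [List.take_add_one]
      simp [List.getElem?_eq_getElem hn]
    have hX : ((out.take n).map f ++ out.drop n)[n]? = some out[n] := by
      rw [List.getElem?_append_right (by omega), hlen, Nat.sub_self, List.getElem?_drop,
        Nat.add_zero, List.getElem?_eq_getElem hn]
    rw [List.modify_eq_set, hX]
    simp only [Option.getD_some]
    rw [List.set_append_right _ _ (by omega), hlen, hdrop]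
    simp only [Nat.sub_self, List.set_cons_zero]
    rw [htake, List.map_append]
    simp

theorem out1_eq (g : List (List Int)) (h w : Nat) (hh : h = g.length) :
    (List.range h).foldl (fun out r =>
      (List.range w).foldl (fun out c =>
        if pvCell out r c = 2 then pvSet out r c 7 else out) out) g
      = g.map (rowFix w) := by
  have key : ∀ (n : Nat), n ≤ g.length →
      (List.range n).foldl (fun out r =>
        (List.range w).foldl (fun out c =>
          if pvCell out r c = 2 then pvSet out r c 7 else out) out) g
        = (List.range n).foldl (fun o r => o.modify r (rowFix w)) g := by
    intro n hn
    induction n with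
    | zero => rfl
    | succ n ih =>
      rw [List.range_succ, List.foldl_append, List.foldl_append,
        ih (Nat.le_of_lt hn)]
      simp only [List.foldl_cons, List.foldl_nil]
      have hlen : ((List.range n).foldl (fun o r => o.modify r (rowFix w)) g).length
          = g.length := by
        rw [foldl_modify_map _ _ _ (Nat.le_of_lt hn)]
        simp [Nat.le_of_lt hn]
      exact inner27_eq w _ n (by omega)
  rw [key h (le_of_eq hh), foldl_modify_map _ _ _ (le_of_eq hh), hh]
  simp

-- ---- painting ----

def pvPaintCells (out : List (List Int)) (cells : List (Nat × Nat)) : List (List Int) :=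
  cells.foldl (fun o z => pvSet o z.1 z.2 2) out

theorem length_paintCells (out : List (List Int)) (cells : List (Nat × Nat)) :
    (pvPaintCells out cells).length = out.length := by
  induction cells generalizing out with
  | nil => rfl
  | cons z cells ih =>
    rw [pvPaintCells, List.foldl_cons, ← pvPaintCells, ih, length_pvSet]

theorem rowlen_paintCells (out : List (List Int)) (cells : List (Nat × Nat)) (r : Nat) :
    ((pvPaintCells out cells).getD r []).length = (out.getD r []).length := by
  induction cells generalizing out with
  | nil => rfl
  | cons z cells ih =>
    rw [pvPaintCells, List.foldl_cons, ← pvPaintCells, ih, rowlen_pvSet]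

theorem pvCell_paintCells (out : List (List Int)) (cells : List (Nat × Nat)) (r c : Nat)
    (hb : ∀ z ∈ cells, z.1 < out.length ∧ z.2 < (out.getD z.1 []).length) :
    pvCell (pvPaintCells out cells) r c
      = if (r, c) ∈ cells then 2 else pvCell out r c := by
  induction cells generalizing out with
  | nil => simp [pvPaintCells]
  | cons z cells ih =>
    rw [pvPaintCells, List.foldl_cons, ← pvPaintCells]
    have hz := hb z (List.mem_cons_self)
    rw [ih _ ?_]
    · rw [pvCell_pvSet _ _ _ _ _ _ hz.1 hz.2]
      rcases z with ⟨zr, zc⟩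
      by_cases hmem : (r, c) ∈ cells
      · simp [hmem]
      · by_cases hzz : r = zr ∧ c = zc
        · have : (r, c) = (zr, zc) := by simp [hzz.1, hzz.2]
          simp [hzz]
        · have : ¬ ((r, c) = (zr, zc)) := by
            simp only [Prod.mk.injEq]
            tauto
          simp [hmem, this, hzz]
    · intro y hy
      rw [length_pvSet, rowlen_pvSet]
      exact hb y (List.mem_cons_of_mem _ hy)

-- ---- selection: A's scan-with-break vs B's minimum ----

def candP (g : List (List Int)) (r5 c5 : Nat) (z : Nat × Nat) : Bool :=
  if z.1 = r5 then pvClearRowA g r5 (min c5 z.2) (max c5 z.2)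
  else if z.2 = c5 then pvClearColA g c5 (min r5 z.1) (max r5 z.1)
  else false

def segOfZero (r5 c5 : Nat) (z : Nat × Nat) : List (Nat × Nat) :=
  if z.1 = r5 then (pvBetween (min c5 z.2) (max c5 z.2)).map (fun cc => (r5, cc))
  else (pvBetween (min r5 z.1) (max r5 z.1)).map (fun rr => (rr, c5))

def segOf (g : List (List Int)) (h w r5 c5 : Nat) : List (Nat × Nat) :=
  match (zerosSpec g h w).find? (candP g r5 c5) with
  | none => []
  | some z => segOfZero r5 c5 z

theorem drawA_eq_find (g : List (List Int)) (r5 c5 : Nat) (out : List (List Int))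
    (zs : List (Nat × Nat)) :
    pvDrawA g r5 c5 out zs
      = match zs.find? (candP g r5 c5) with
        | none => out
        | some z => pvPaintCells out (segOfZero r5 c5 z) := by
  induction zs generalizing out with
  | nil => rfl
  | cons z zs ih =>
    rcases z with ⟨r0, c0⟩
    by_cases hr : r5 = r0
    · subst hr
      by_cases hclear : pvClearRowA g r5 (min c5 c0) (max c5 c0) = true
      · have hc : candP g r5 c5 (r5, c0) = true := by simp [candP, hclear]
        rw [List.find?_cons_of_pos hc]
        unfold pvDrawA
        simp [hclear, segOfZero, pvPaintRowA, pvPaintCells, List.foldl_map]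
      · have hc : ¬ (candP g r5 c5 (r5, c0) = true) := by
          simp [candP]
          simpa using hclear
        rw [List.find?_cons_of_neg hc]
        unfold pvDrawA
        simp only [reduceIte]
        rw [if_neg (by simpa using hclear), ih]
    · have hr0 : ¬ ((r0 : Nat) = r5) := fun h => hr h.symm
      by_cases hcc : c5 = c0
      · subst hcc
        by_cases hclear : pvClearColA g c5 (min r5 r0) (max r5 r0) = true
        · have hc : candP g r5 c5 (r0, c5) = true := by
            simp only [candP]
            rw [if_neg hr0]
            simpa using hclear
          rw [List.find?_cons_of_pos hc]
          unfold pvDrawA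
          rw [if_neg hr]
          simp only [if_true]
          rw [if_pos hclear]
          have hz : segOfZero r5 c5 (r0, c5)
              = (pvBetween (min r5 r0) (max r5 r0)).map (fun rr => (rr, c5)) := by
            simp only [segOfZero]
            rw [if_neg hr0]
          rw [hz, pvPaintColA, pvPaintCells, List.foldl_map]
        · have hc : ¬ (candP g r5 c5 (r0, c5) = true) := by
            simp only [candP]
            rw [if_neg hr0]
            simpa using hclear
          rw [List.find?_cons_of_neg hc]
          unfold pvDrawA
          rw [if_neg hr]
          simp only [if_true]
          rw [if_neg (by simpa using hclear), ih]
      · have hcc0 : ¬ ((c0 : Nat) = c5) := fun h => hcc h.symm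
        have hc : ¬ (candP g r5 c5 (r0, c0) = true) := by
          simp only [candP]
          rw [if_neg hr0, if_neg hcc0]
          simp
        rw [List.find?_cons_of_neg hc]
        unfold pvDrawA
        rw [if_neg hr, if_neg hcc, ih]

theorem pvLexLt_trans {a b c : Nat × Nat} (h1 : pvLexLt a b = true) (h2 : pvLexLt b c = true) :
    pvLexLt a c = true := by
  simp only [pvLexLt, Bool.or_eq_true, Bool.and_eq_true, decide_eq_true_eq, beq_iff_eq] at *
  omega

theorem pvLexLt_not_not {a b c : Nat × Nat} (h1 : pvLexLt a b = false)
    (h2 : pvLexLt a c = true) : pvLexLt b c = true := by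
  simp only [pvLexLt, Bool.or_eq_true, Bool.and_eq_true, Bool.or_eq_false_iff,
    Bool.and_eq_false_iff, decide_eq_true_eq, decide_eq_false_iff_not, beq_iff_eq,
    beq_eq_false_iff_ne] at *
  omega

theorem pvMinKey_spec (k : Nat × Nat) (ks : List (Nat × Nat)) :
    pvMinKey k ks ∈ k :: ks ∧ ∀ y ∈ k :: ks, pvLexLt y (pvMinKey k ks) = false := by
  induction ks generalizing k with
  | nil =>
    refine ⟨by simp [pvMinKey], ?_⟩
    intro y hy
    simp [pvMinKey] at *
    simp [hy, pvLexLt]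
  | cons q ks ih =>
    by_cases hqk : pvLexLt q k = true
    · have hstep : pvMinKey k (q :: ks) = pvMinKey q ks := by
        simp [pvMinKey, List.foldl_cons, hqk]
      rw [hstep]
      rcases ih q with ⟨hmem, hall⟩
      refine ⟨?_, ?_⟩
      · rcases List.mem_cons.1 hmem with h | h <;> simp [h]
      · intro y hy
        have hseed := hall _ (List.mem_cons_self)
        rcases List.mem_cons.1 hy with rfl | hy'
        · by_contra hk
          have hk' : pvLexLt y (pvMinKey q ks) = true := by simpa using hk
          have := pvLexLt_trans hqk hk'
          rw [this] at hseed
          simp at hseed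
        · rcases List.mem_cons.1 hy' with rfl | hy''
          · exact hseed
          · exact hall _ (List.mem_cons_of_mem _ hy'')
    · have hstep : pvMinKey k (q :: ks) = pvMinKey k ks := by
        simp [pvMinKey, List.foldl_cons, hqk]
      rw [hstep]
      rcases ih k with ⟨hmem, hall⟩
      refine ⟨?_, ?_⟩
      · rcases List.mem_cons.1 hmem with h | h <;> simp [h]
      · intro y hy
        have hseed := hall _ (List.mem_cons_self)
        rcases List.mem_cons.1 hy with rfl | hy'
        · exact hseed
        · rcases List.mem_cons.1 hy' with rfl | hy''
          · by_contra hq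
            have hq' : pvLexLt y (pvMinKey k ks) = true := by simpa using hq
            have hqk' : pvLexLt y k = false := by simpa using hqk
            have := pvLexLt_not_not hqk' hq'
            rw [this] at hseed
            simp at hseed
          · exact hall _ (List.mem_cons_of_mem _ hy'')

theorem find?_first_min {p : Nat × Nat → Bool} (l : List (Nat × Nat)) (z : Nat × Nat)
    (hp : l.Pairwise (fun a b => pvLexLt a b = true))
    (hz : l.find? p = some z) :
    z ∈ l ∧ p z = true ∧ ∀ y ∈ l, p y = true → y = z ∨ pvLexLt z y = true := by
  induction l with
  | nil => simp at hz
  | cons a l ih =>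
    rw [List.find?_cons] at hz
    by_cases hpa : p a = true
    · rw [hpa] at hz
      simp only [Option.some.injEq] at hz
      subst hz
      refine ⟨List.mem_cons_self, hpa, ?_⟩
      intro y hy hpy
      rcases List.mem_cons.1 hy with rfl | hy'
      · exact Or.inl rfl
      · exact Or.inr (List.rel_of_pairwise_cons hp hy')
    · rw [Bool.not_eq_true] at hpa
      rw [hpa] at hz
      rcases ih (List.Pairwise.of_cons hp) hz with ⟨hmem, hpz, hmin⟩
      refine ⟨List.mem_cons_of_mem _ hmem, hpz, ?_⟩
      intro y hy hpy
      rcases List.mem_cons.1 hy with rfl | hy'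
      · rw [hpy] at hpa
        simp at hpa
      · exact hmin y hy' hpy

-- ---- assembling the per-five step ----

theorem clearRowB_eq (g : List (List Int)) (r a b : Nat) :
    pvClearRowB g r a b = pvClearRowA g r a b := rfl

theorem clearColB_eq (g : List (List Int)) (c a b : Nat) :
    pvClearColB g c a b = pvClearColA g c a b := rfl

theorem keys_mem (g : List (List Int)) (h w r5 c5 : Nat)
    (hr5 : r5 < h) (hc5 : c5 < w) (h5 : pvCell g r5 c5 = 5)
    (y : Nat × Nat) :
    (y ∈ List.map (fun c0 => (r5, c0))
           (List.filter (fun c0 => pvClearRowB g r5 (min c5 c0) (max c5 c0))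
             (((List.range h).map (fun r => (List.range w).filter (fun c => pvCell g r c == 0))).getD r5 []))
         ++ List.map (fun r0 => (r0, c5))
           (List.filter (fun r0 => pvClearColB g c5 (min r5 r0) (max r5 r0))
             (((List.range w).map (fun c => (List.range h).filter (fun r => pvCell g r c == 0))).getD c5 [])))
      ↔ (y ∈ zerosSpec g h w ∧ candP g r5 c5 y = true) := by
  have hzrow := PySem.List.getD_map_range
    (fun r => (List.range w).filter (fun c => pvCell g r c == 0)) h r5 [] hr5
  have hzcol := PySem.List.getD_map_range
    (fun c => (List.range h).filter (fun r => pvCell g r c == 0)) w c5 [] hc5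
  rw [hzrow, hzcol, List.mem_append, mem_zerosSpec]
  constructor
  · rintro (hy | hy)
    · rcases List.mem_map.1 hy with ⟨c0, hc0, rfl⟩
      rcases List.mem_filter.1 hc0 with ⟨hc0', hclear⟩
      rcases List.mem_filter.1 hc0' with ⟨hcw, h0⟩
      refine ⟨⟨hr5, List.mem_range.1 hcw, by simpa using h0⟩, ?_⟩
      simp only [candP, if_true]
      rw [clearRowB_eq] at hclear
      exact hclear
    · rcases List.mem_map.1 hy with ⟨r0, hr0, rfl⟩
      rcases List.mem_filter.1 hr0 with ⟨hr0', hclear⟩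
      rcases List.mem_filter.1 hr0' with ⟨hrh, h0⟩
      have h0' : pvCell g r0 c5 = 0 := by simpa using h0
      have hner : ¬ ((r0, c5).1 = r5) := by
        intro hcontra
        simp only at hcontra
        rw [hcontra] at h0'
        rw [h0'] at h5
        exact absurd h5 (by norm_num)
      refine ⟨⟨List.mem_range.1 hrh, hc5, h0'⟩, ?_⟩
      simp only [candP]
      rw [if_neg hner]
      simp only [if_true]
      rw [clearColB_eq] at hclear
      exact hclear
  · rintro ⟨⟨hyh, hyw, hy0⟩, hcand⟩
    rcases y with ⟨yr, yc⟩
    simp only at hyh hyw hy0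
    by_cases hyr : yr = r5
    · subst hyr
      left
      apply List.mem_map.2
      refine ⟨yc, ?_, rfl⟩
      apply List.mem_filter.2
      refine ⟨List.mem_filter.2 ⟨List.mem_range.2 hyw, by simpa using hy0⟩, ?_⟩
      simp only [candP, if_true] at hcand
      rw [clearRowB_eq]
      exact hcand
    · by_cases hyc : yc = c5
      · subst hyc
        right
        apply List.mem_map.2
        refine ⟨yr, ?_, rfl⟩
        apply List.mem_filter.2
        refine ⟨List.mem_filter.2 ⟨List.mem_range.2 hyh, by simpa using hy0⟩, ?_⟩
        simp only [candP] at hcand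
        rw [if_neg (by simpa using hyr)] at hcand
        simp only [if_true] at hcand
        rw [clearColB_eq]
        exact hcand
      · exfalso
        simp only [candP] at hcand
        rw [if_neg (by simpa using hyr), if_neg (by simpa using hyc)] at hcand
        simp at hcand

theorem segOf_bounds (g : List (List Int)) (h w r5 c5 : Nat)
    (hr5 : r5 < h) (hc5 : c5 < w) :
    ∀ z ∈ segOf g h w r5 c5, z.1 < h ∧ z.2 < w := by
  unfold segOf
  cases hfind : (zerosSpec g h w).find? (candP g r5 c5) with
  | none => simp
  | some a =>
    intro z hz
    have ha := (mem_zerosSpec g h w a).1 (List.mem_of_find?_eq_some hfind)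
    simp only at hz
    unfold segOfZero at hz
    split at hz
    · rcases List.mem_map.1 hz with ⟨cc, hcc, rfl⟩
      unfold pvBetween at hcc
      have := List.mem_range'.1 hcc
      refine ⟨hr5, ?_⟩
      simp only
      omega
    · rcases List.mem_map.1 hz with ⟨rr, hrr, rfl⟩
      unfold pvBetween at hrr
      have := List.mem_range'.1 hrr
      refine ⟨?_, hc5⟩
      simp only
      omega

theorem drawA_eq_paint (g : List (List Int)) (h w r5 c5 : Nat) (out : List (List Int)) :
    pvDrawA g r5 c5 out (zerosSpec g h w) = pvPaintCells out (segOf g h w r5 c5) := by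
  rw [drawA_eq_find]
  unfold segOf
  cases hfind : (zerosSpec g h w).find? (candP g r5 c5) <;> simp [pvPaintCells]

theorem length_foldA (g : List (List Int)) (h w : Nat) (fs : List (Nat × Nat))
    (out : List (List Int)) :
    (fs.foldl (fun o p => pvPaintCells o (segOf g h w p.1 p.2)) out).length = out.length := by
  induction fs generalizing out with
  | nil => rfl
  | cons p fs ih => rw [List.foldl_cons, ih, length_paintCells]

theorem rowlen_foldA (g : List (List Int)) (h w : Nat) (fs : List (Nat × Nat))
    (out : List (List Int)) (r : Nat) :
    ((fs.foldl (fun o p => pvPaintCells o (segOf g h w p.1 p.2)) out).getD r []).length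
      = (out.getD r []).length := by
  induction fs generalizing out with
  | nil => rfl
  | cons p fs ih => rw [List.foldl_cons, ih, rowlen_paintCells]

theorem cell_foldA (g : List (List Int)) (h w : Nat) (fs : List (Nat × Nat))
    (out : List (List Int)) (r c : Nat)
    (hb : ∀ p ∈ fs, ∀ z ∈ segOf g h w p.1 p.2, z.1 < out.length ∧ z.2 < (out.getD z.1 []).length) :
    pvCell (fs.foldl (fun o p => pvPaintCells o (segOf g h w p.1 p.2)) out) r c
      = if ∃ p ∈ fs, (r, c) ∈ segOf g h w p.1 p.2 then 2 else pvCell out r c := by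
  induction fs generalizing out with
  | nil => simp
  | cons p fs ih =>
    rw [List.foldl_cons, ih]
    · rw [pvCell_paintCells _ _ _ _ (hb p List.mem_cons_self)]
      by_cases hex : ∃ q ∈ fs, (r, c) ∈ segOf g h w q.1 q.2
      · rw [if_pos hex, if_pos ?_]
        rcases hex with ⟨q, hq, hmem⟩
        exact ⟨q, List.mem_cons_of_mem _ hq, hmem⟩
      · rw [if_neg hex]
        by_cases hp : (r, c) ∈ segOf g h w p.1 p.2
        · rw [if_pos hp, if_pos ?_]
          exact ⟨p, List.mem_cons_self, hp⟩
        · rw [if_neg hp, if_neg ?_]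
          rintro ⟨q, hq, hmem⟩
          rcases List.mem_cons.1 hq with rfl | hq'
          · exact hp hmem
          · exact hex ⟨q, hq', hmem⟩
    · intro q hq z hz
      rw [length_paintCells, rowlen_paintCells]
      exact hb q (List.mem_cons_of_mem _ hq) z hz

theorem mem_set_update (s : PySem.Set (Nat × Nat)) (xs : List (Nat × Nat)) (y : Nat × Nat) :
    y ∈ PySem.Set.update s xs ↔ y ∈ s ∨ y ∈ xs := by
  induction xs generalizing s with
  | nil => simp [PySem.Set.update]
  | cons x xs ih =>
    have hstep : PySem.Set.update s (x :: xs) = PySem.Set.update (s.add x) xs := rfl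
    rw [hstep, ih]
    rw [PySem.Set.mem_add]
    simp [List.mem_cons]
    tauto

theorem mem_foldB (g : List (List Int)) (h w : Nat) (fs : List (Nat × Nat))
    (s0 : PySem.Set (Nat × Nat)) (y : Nat × Nat) :
    (y ∈ fs.foldl (fun s p => PySem.Set.update s (segOf g h w p.1 p.2)) s0)
      ↔ y ∈ s0 ∨ ∃ p ∈ fs, y ∈ segOf g h w p.1 p.2 := by
  induction fs generalizing s0 with
  | nil => simp
  | cons p fs ih =>
    rw [List.foldl_cons, ih, mem_set_update]
    constructor
    · rintro ((hy | hy) | ⟨q, hq, hmem⟩)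
      · exact Or.inl hy
      · exact Or.inr ⟨p, List.mem_cons_self, hy⟩
      · exact Or.inr ⟨q, List.mem_cons_of_mem _ hq, hmem⟩
    · rintro (hy | ⟨q, hq, hmem⟩)
      · exact Or.inl (Or.inl hy)
      · rcases List.mem_cons.1 hq with rfl | hq'
        · exact Or.inl (Or.inr hmem)
        · exact Or.inr ⟨q, hq', hmem⟩

theorem foldl_congr_mem' {α β : Type} (l : List β) (f f' : α → β → α) (init : α)
    (hfg : ∀ x ∈ l, ∀ a, f a x = f' a x) : l.foldl f init = l.foldl f' init := by
  induction l generalizing init with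
  | nil => rfl
  | cons x l ih =>
    rw [List.foldl_cons, List.foldl_cons, hfg x List.mem_cons_self]
    exact ih _ (fun y hy a => hfg y (List.mem_cons_of_mem _ hy) a)

theorem bstep_eq (g : List (List Int)) (h w r5 c5 : Nat)
    (hr5 : r5 < h) (hc5 : c5 < w) (h5 : pvCell g r5 c5 = 5)
    (s : PySem.Set (Nat × Nat)) :
    (match
        (List.map (fun c0 => (r5, c0))
           (List.filter (fun c0 => pvClearRowB g r5 (min c5 c0) (max c5 c0))
             (((List.range h).map (fun r => (List.range w).filter (fun c => pvCell g r c == 0))).getD r5 []))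
         ++ List.map (fun r0 => (r0, c5))
           (List.filter (fun r0 => pvClearColB g c5 (min r5 r0) (max r5 r0))
             (((List.range w).map (fun c => (List.range h).filter (fun r => pvCell g r c == 0))).getD c5 []))) with
      | [] => s
      | k :: ks =>
        if (pvMinKey k ks).1 = r5 then
          PySem.Set.update s ((List.range' (min c5 (pvMinKey k ks).2 + 1)
            (max c5 (pvMinKey k ks).2 - (min c5 (pvMinKey k ks).2 + 1))).map (fun cc => (r5, cc)))
        else
          PySem.Set.update s ((List.range' (min r5 (pvMinKey k ks).1 + 1)
            (max r5 (pvMinKey k ks).1 - (min r5 (pvMinKey k ks).1 + 1))).map (fun rr => (rr, c5))))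
      = PySem.Set.update s (segOf g h w r5 c5) := by
  have hkm := keys_mem g h w r5 c5 hr5 hc5 h5
  cases hkeys : (List.map (fun c0 => (r5, c0))
           (List.filter (fun c0 => pvClearRowB g r5 (min c5 c0) (max c5 c0))
             (((List.range h).map (fun r => (List.range w).filter (fun c => pvCell g r c == 0))).getD r5 []))
         ++ List.map (fun r0 => (r0, c5))
           (List.filter (fun r0 => pvClearColB g c5 (min r5 r0) (max r5 r0))
             (((List.range w).map (fun c => (List.range h).filter (fun r => pvCell g r c == 0))).getD c5 []))) with
  | nil =>
    have hnone : (zerosSpec g h w).find? (candP g r5 c5) = none := by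
      rw [List.find?_eq_none]
      intro z hz
      intro hcand
      have : z ∈ ([] : List (Nat × Nat)) := by
        rw [← hkeys]
        exact (hkm z).2 ⟨hz, hcand⟩
      simp at this
    have hseg : segOf g h w r5 c5 = [] := by
      unfold segOf
      rw [hnone]
    rw [hseg]
    rfl
  | cons k ks =>
    dsimp only
    rcases pvMinKey_spec k ks with ⟨hbmem, hball⟩
    have hbmem' : pvMinKey k ks ∈ zerosSpec g h w ∧ candP g r5 c5 (pvMinKey k ks) = true := by
      apply (hkm _).1
      rw [hkeys]
      exact hbmem
    cases hfind : (zerosSpec g h w).find? (candP g r5 c5) with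
    | none =>
      exfalso
      rw [List.find?_eq_none] at hfind
      exact absurd hbmem'.2 (by simpa using hfind _ hbmem'.1)
    | some z =>
      rcases find?_first_min (zerosSpec g h w) z (zerosSpec_pairwise g h w) hfind with
        ⟨hzmem, hzcand, hzmin⟩
      have hzkeys : z ∈ k :: ks := by
        rw [← hkeys]
        exact (hkm z).2 ⟨hzmem, hzcand⟩
      have hbz : pvMinKey k ks = z := by
        rcases hzmin (pvMinKey k ks) hbmem'.1 hbmem'.2 with hbz | hlt
        · exact hbz
        · exact absurd hlt (by simp [hball z hzkeys])
      have hseg : segOf g h w r5 c5 = segOfZero r5 c5 z := by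
        unfold segOf
        rw [hfind]
      rw [hseg, ← hbz]
      unfold segOfZero pvBetween
      by_cases hb1 : (pvMinKey k ks).1 = r5
      · rw [if_pos hb1, if_pos hb1]
      · rw [if_neg hb1, if_neg hb1]

theorem rowFix_length (w : Nat) (row : List Int) : (rowFix w row).length = row.length := by
  unfold rowFix
  induction w with
  | zero => simp
  | succ w ih =>
    rw [List.range_succ, List.foldl_append]
    simp only [List.foldl_cons, List.foldl_nil]
    split
    · rw [List.length_set]
      exact ih
    · exact ih

theorem rowfixed_getD (row : List Int) (w c : Nat) (hwle : w ≤ row.length) :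
    ((row.take w).map (fun v => if v = 2 then 7 else v) ++ row.drop w).getD c 0
      = if c < w ∧ row.getD c 0 = 2 then 7 else row.getD c 0 := by
  have hlen : ((row.take w).map (fun v => if v = 2 then 7 else v)).length = w := by
    simp [hwle]
  rw [List.getD_eq_getElem?_getD, List.getD_eq_getElem?_getD]
  rcases Nat.lt_or_ge c w with hcw | hcw
  · have hcl : c < row.length := lt_of_lt_of_le hcw hwle
    rw [List.getElem?_append_left (by omega), List.getElem?_map,
      List.getElem?_take_of_lt hcw, List.getElem?_eq_getElem hcl]
    simp [hcw]
  · rw [List.getElem?_append_right (by omega), hlen, List.getElem?_drop]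
    have hx : w + (c - w) = c := by omega
    rw [hx]
    have hncw : ¬ (c < w) := by omega
    rcases Nat.lt_or_ge c row.length with hcl | hcl
    · rw [List.getElem?_eq_getElem hcl]
      simp [hncw]
    · rw [List.getElem?_eq_none (by omega)]
      simp [hncw]

theorem cell_base (g : List (List Int)) (w : Nat) (r c : Nat) (hr : r < g.length)
    (hwle : w ≤ (g.getD r []).length) :
    pvCell (g.map (rowFix w)) r c
      = if c < w ∧ pvCell g r c = 2 then 7 else pvCell g r c := by
  have hrm : r < (g.map (rowFix w)).length := by simpa using hr
  have hmap : (g.map (rowFix w)).getD r [] = rowFix w (g.getD r []) := by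
    rw [List.getD_eq_getElem (g.map (rowFix w)) [] hrm, List.getElem_map,
      List.getD_eq_getElem g [] hr]
  unfold pvCell
  rw [hmap, rowFix_eq w _ hwle, rowfixed_getD _ _ _ hwle]

def bstepB (g : List (List Int)) (h w : Nat) (paint : PySem.Set (Nat × Nat)) (p : Nat × Nat) :
    PySem.Set (Nat × Nat) :=
  match
    (List.map (fun c0 => (p.1, c0))
       (List.filter (fun c0 => pvClearRowB g p.1 (min p.2 c0) (max p.2 c0))
         (((List.range h).map (fun r => (List.range w).filter (fun c => pvCell g r c == 0))).getD p.1 []))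
     ++ List.map (fun r0 => (r0, p.2))
       (List.filter (fun r0 => pvClearColB g p.2 (min p.1 r0) (max p.1 r0))
         (((List.range w).map (fun c => (List.range h).filter (fun r => pvCell g r c == 0))).getD p.2 []))) with
  | [] => paint
  | k :: ks =>
    if (pvMinKey k ks).1 = p.1 then
      PySem.Set.update paint ((List.range' (min p.2 (pvMinKey k ks).2 + 1)
        (max p.2 (pvMinKey k ks).2 - (min p.2 (pvMinKey k ks).2 + 1))).map (fun cc => (p.1, cc)))
    else
      PySem.Set.update paint ((List.range' (min p.1 (pvMinKey k ks).1 + 1)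
        (max p.1 (pvMinKey k ks).1 - (min p.1 (pvMinKey k ks).1 + 1))).map (fun rr => (rr, p.2)))

theorem transform_eq_alt (grid : List (List Int)) (hpre : Pre_transform grid) :
    transform grid = transform_alt grid := by
  obtain ⟨hne, hrect⟩ := hpre
  have hrect' : ∀ r : Nat, r < grid.length →
      (grid.getD r []).length = (grid.getD 0 []).length := by
    intro r hr
    rw [List.getD_eq_getElem _ _ hr]
    exact hrect _ (List.getElem_mem hr)
  -- A reduced to a fold of paint operations over the spec lists
  have hA1 : transform grid = (fivesSpec grid grid.length (grid.getD 0 []).length).foldl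
      (fun out p => pvPaintCells out (segOf grid grid.length (grid.getD 0 []).length p.1 p.2))
      (grid.map (rowFix (grid.getD 0 []).length)) := by
    unfold transform
    simp only [fz_eq]
    rw [out1_eq grid grid.length (grid.getD 0 []).length rfl]
    exact foldl_congr_mem' _ _ _ _
      (fun p _ out => drawA_eq_paint grid grid.length (grid.getD 0 []).length p.1 p.2 out)
  -- B spelled out
  have hB0 : transform_alt grid = grid.zipIdx.map (fun p =>
      p.1.zipIdx.map (fun q =>
        if ((fivesSpec grid grid.length (grid.getD 0 []).length).foldl
              (bstepB grid grid.length (grid.getD 0 []).length) PySem.Set.empty).contains (p.2, q.2)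
        then 2
        else if q.1 = 2 then 7 else q.1)) := rfl
  have hpaint : (fivesSpec grid grid.length (grid.getD 0 []).length).foldl
        (bstepB grid grid.length (grid.getD 0 []).length) PySem.Set.empty
      = (fivesSpec grid grid.length (grid.getD 0 []).length).foldl
          (fun s p => PySem.Set.update s (segOf grid grid.length (grid.getD 0 []).length p.1 p.2))
          PySem.Set.empty := by
    apply foldl_congr_mem'
    intro p hp s
    rcases (mem_fivesSpec grid grid.length (grid.getD 0 []).length p).1 hp with ⟨h1, h2, h3⟩
    exact bstep_eq grid grid.length (grid.getD 0 []).length p.1 p.2 h1 h2 h3 s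
  rw [hA1, hB0, hpaint]
  have hcont : ∀ y : Nat × Nat,
      (((fivesSpec grid grid.length (grid.getD 0 []).length).foldl
          (fun s p => PySem.Set.update s (segOf grid grid.length (grid.getD 0 []).length p.1 p.2))
          PySem.Set.empty).contains y = true)
        ↔ ∃ p ∈ fivesSpec grid grid.length (grid.getD 0 []).length,
            y ∈ segOf grid grid.length (grid.getD 0 []).length p.1 p.2 := by
    intro y
    rw [PySem.Set.contains_iff, mem_foldB]
    simp [PySem.Set.empty]
  have hb : ∀ p ∈ fivesSpec grid grid.length (grid.getD 0 []).length,
      ∀ z ∈ segOf grid grid.length (grid.getD 0 []).length p.1 p.2,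
        z.1 < (grid.map (rowFix (grid.getD 0 []).length)).length ∧
        z.2 < ((grid.map (rowFix (grid.getD 0 []).length)).getD z.1 []).length := by
    intro p hp z hz
    rcases (mem_fivesSpec grid grid.length (grid.getD 0 []).length p).1 hp with ⟨h1, h2, _⟩
    rcases segOf_bounds grid grid.length (grid.getD 0 []).length p.1 p.2 h1 h2 z hz with ⟨hz1, hz2⟩
    refine ⟨by simpa using hz1, ?_⟩
    rw [List.getD_eq_getElem _ _ (by simpa using hz1), List.getElem_map, rowFix_length,
      ← List.getD_eq_getElem grid [] hz1, hrect' z.1 hz1]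
    exact hz2
  apply List.ext_getElem
  · rw [length_foldA]
    simp
  · intro r hr1 hr2
    have hrH : r < grid.length := by
      rw [length_foldA] at hr1
      simpa using hr1
    have hrz : r < grid.zipIdx.length := by simpa using hrH
    rw [List.getElem_map, List.getElem_zipIdx]
    simp only [Nat.zero_add]
    have hrowlen : ((fivesSpec grid grid.length (grid.getD 0 []).length).foldl
        (fun out p => pvPaintCells out (segOf grid grid.length (grid.getD 0 []).length p.1 p.2))
        (grid.map (rowFix (grid.getD 0 []).length)))[r]
          = ((fivesSpec grid grid.length (grid.getD 0 []).length).foldl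
              (fun out p => pvPaintCells out (segOf grid grid.length (grid.getD 0 []).length p.1 p.2))
              (grid.map (rowFix (grid.getD 0 []).length))).getD r [] := by
      rw [List.getD_eq_getElem _ _ hr1]
    rw [hrowlen]
    apply List.ext_getElem
    · rw [rowlen_foldA]
      rw [List.getD_eq_getElem _ _ (by simpa using hrH), List.getElem_map, rowFix_length,
        ← List.getD_eq_getElem grid [] hrH]
      simp
    · intro c hc1 hc2
      have hclen : c < (grid.getD r []).length := by
        rw [rowlen_foldA, List.getD_eq_getElem _ _ (by simpa using hrH), List.getElem_map,
          rowFix_length, ← List.getD_eq_getElem grid [] hrH] at hc1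
        exact hc1
      have hcw : c < (grid.getD 0 []).length := by
        rw [← hrect' r hrH]
        exact hclen
      have hclen' : c < grid[r].length := by
        rw [← List.getD_eq_getElem grid [] hrH]
        exact hclen
      -- right side: element of the zipIdx comprehension
      rw [List.getElem_map, List.getElem_zipIdx]
      simp only [Nat.zero_add]
      -- left side as pvCell
      rw [← List.getD_eq_getElem _ (0 : Int) hc1]
      show pvCell ((fivesSpec grid grid.length (grid.getD 0 []).length).foldl
          (fun out p => pvPaintCells out (segOf grid grid.length (grid.getD 0 []).length p.1 p.2))
          (grid.map (rowFix (grid.getD 0 []).length))) r c = _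
      rw [cell_foldA _ _ _ _ _ _ _ hb,
        cell_base grid (grid.getD 0 []).length r c hrH (le_of_eq (hrect' r hrH).symm)]
      have hpv : pvCell grid r c = grid[r][c] := by
        unfold pvCell
        rw [List.getD_eq_getElem grid [] hrH]
        exact List.getD_eq_getElem _ _ hclen'
      by_cases hpy : ∃ p ∈ fivesSpec grid grid.length (grid.getD 0 []).length,
          (r, c) ∈ segOf grid grid.length (grid.getD 0 []).length p.1 p.2
      · rw [if_pos hpy]
        have hcy := (hcont (r, c)).2 hpy
        rw [hcy]
        simp
      · rw [if_neg hpy]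
        have hcy : (((fivesSpec grid grid.length (grid.getD 0 []).length).foldl
            (fun s p => PySem.Set.update s (segOf grid grid.length (grid.getD 0 []).length p.1 p.2))
            PySem.Set.empty).contains (r, c)) = false := by
          rw [← Bool.not_eq_true]
          intro hcon
          exact hpy ((hcont (r, c)).1 hcon)
        rw [hcy]
        have hcw2 : c < (grid[0]?.getD []).length := hcw
        simp [hcw2, hpv]

-- ===== VERDICT (by name: the statement is the Claim_ definition above) =====
theorem transform_spec : Claim_equal_transform := by
  intro grid _ hpre
  unfold Spec_transform
  exact transform_eq_alt grid hpre
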